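-- pv_equiv track=rewrite | github.com/ladybug-tools/ladybug-geojson | ladybug_geojson/slippy/map.py | get_recurrent_tiles
-- ===== SOURCE A (Python) =====
-- VALID_RANGE = range(1, 24)
--
-- def get_recurrent_tiles(
--     x: float,
--     y: float,
--     curr_zoom: int,
--     target_zoom: int):
--     ''' Get tile coordinates from initial tile.
--
--     Args:
--     - x: initial tile x.
--     - y: initial tile y.
--     - curr_zoom: zoom of the initial tile. Eg. 15.
--     - target_zoom: zoom of target tiles. Eg. 16.
--     '''
--     def recurrent_tiles(
--         x,
--         y,
--         curr_zoom,
--         target_zoom):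
--
--         diff = target_zoom - curr_zoom
--
--         if diff == 0:
--             return x, y
--         else:
--             out = []
--             first_tile = (x*2, y*2)
--             second_tile = (x*2+1, y*2)
--             third_tile = (x*2, y*2+1)
--             fourth_tile = (x*2+1, y*2+1)
--             tiles = [first_tile, second_tile,
--                 third_tile, fourth_tile]
--             for t in tiles:
--                 res = recurrent_tiles(t[0],
--                   t[1],
--                   curr_zoom+1,
--                   target_zoom)
--                 out.extend(res)
--             return out
--
--     if curr_zoom > target_zoom:
--         raise Exception('current zoom must be'+\
--           ' smaller than target zoom.')
--
--     if curr_zoom not in VALID_RANGE or \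
--         target_zoom not in VALID_RANGE:
--         raise Exception('valid zoom is from 1 to 23.')
--
--     tiles = recurrent_tiles(x, y,
--         curr_zoom,
--         target_zoom)
--     return [tuple(tiles[i:i + 2]) for i \
--       in range(0, len(tiles), 2)]
-- ===== SOURCE B (Python) =====
-- VALID_RANGE = range(1, 24)
--
-- def get_recurrent_tiles(x, y, curr_zoom, target_zoom):
--     if curr_zoom > target_zoom:
--         raise Exception('current zoom must be'
--                         ' smaller than target zoom.')
--     if curr_zoom not in VALID_RANGE or target_zoom not in VALID_RANGE:
--         raise Exception('valid zoom is from 1 to 23.')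
--     tiles = [(x, y)]
--     for _ in range(target_zoom - curr_zoom):
--         tiles = [c for tx, ty in tiles
--                    for c in ((2*tx, 2*ty), (2*tx+1, 2*ty),
--                              (2*tx, 2*ty+1), (2*tx+1, 2*ty+1))]
--     return tiles
-- ===== Notes on version B (the rewrite author's own statement) =====
-- stated objective: simpler
-- what changed: Replaces the nested DFS recursion producing a flat coordinate list that is then re-paired by slicing with a single iterative loop that expands a list of (x, y) pairs level by level (diff passes), returning the pair list directly.
import Mathlib
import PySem

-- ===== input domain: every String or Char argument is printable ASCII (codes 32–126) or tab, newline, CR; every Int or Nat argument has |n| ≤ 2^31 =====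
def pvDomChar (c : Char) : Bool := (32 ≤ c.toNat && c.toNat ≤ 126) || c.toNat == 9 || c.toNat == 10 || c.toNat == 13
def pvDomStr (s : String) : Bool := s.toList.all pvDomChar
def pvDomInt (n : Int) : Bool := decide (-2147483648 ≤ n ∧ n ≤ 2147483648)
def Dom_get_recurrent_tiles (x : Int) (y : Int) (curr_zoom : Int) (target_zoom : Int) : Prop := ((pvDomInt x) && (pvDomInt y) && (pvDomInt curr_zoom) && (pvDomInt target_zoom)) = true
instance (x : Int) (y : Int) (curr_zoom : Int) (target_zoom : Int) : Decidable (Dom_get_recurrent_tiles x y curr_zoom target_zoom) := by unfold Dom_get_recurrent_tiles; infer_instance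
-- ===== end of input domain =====

-- B replaces the DFS recursion + flatten/re-pair step of A by a simple iterative
-- level-by-level expansion of a list of (x, y) pairs (objective: simpler).

-- ===== PORT A =====
-- inner helper `recurrent_tiles`, returning the flat list of coordinates
-- (the Python returns the tuple (x, y) at diff == 0 and a flat list otherwise;
-- both are consumed by `extend`/slicing as flat sequences, modelled as List Int).
-- `fuel` only makes the recursion total; it is (target_zoom - curr_zoom).toNat at
-- the call site, so the fuel-0 branch is never taken on inputs A returns on.
def recurrentTilesA : Nat → Int → Int → Int → Int → List Int
  | fuel, x, y, curr_zoom, target_zoom =>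
    if target_zoom - curr_zoom = 0 then
      [x, y]
    else
      match fuel with
      | 0 => []
      | f + 1 =>
        [(x*2, y*2), (x*2+1, y*2), (x*2, y*2+1), (x*2+1, y*2+1)].foldl
          (fun out t => out ++ recurrentTilesA f t.1 t.2 (curr_zoom+1) target_zoom) []

-- [tuple(tiles[i:i+2]) for i in range(0, len(tiles), 2)] on an even-length flat list
def pairUpA : List Int → List (Int × Int)
  | a :: b :: rest => (a, b) :: pairUpA rest
  | _ => []

-- the two `raise` branches return no value; those inputs are excluded by Pre_
def get_recurrent_tiles (x : Int) (y : Int) (curr_zoom : Int) (target_zoom : Int) : List (Int × Int) :=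
  if curr_zoom > target_zoom then []
  else if ¬ (1 ≤ curr_zoom ∧ curr_zoom < 24) ∨ ¬ (1 ≤ target_zoom ∧ target_zoom < 24) then []
  else pairUpA (recurrentTilesA (target_zoom - curr_zoom).toNat x y curr_zoom target_zoom)

-- ===== PORT B =====
def childrenB (t : Int × Int) : List (Int × Int) :=
  [(2*t.1, 2*t.2), (2*t.1+1, 2*t.2), (2*t.1, 2*t.2+1), (2*t.1+1, 2*t.2+1)]

-- the `for _ in range(diff)` loop of Source B
def expandB : Nat → List (Int × Int) → List (Int × Int)
  | 0, tiles => tiles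
  | n + 1, tiles => expandB n (tiles.flatMap childrenB)

def get_recurrent_tiles_alt (x : Int) (y : Int) (curr_zoom : Int) (target_zoom : Int) : List (Int × Int) :=
  if curr_zoom > target_zoom then []
  else if ¬ (1 ≤ curr_zoom ∧ curr_zoom < 24) ∨ ¬ (1 ≤ target_zoom ∧ target_zoom < 24) then []
  else expandB (target_zoom - curr_zoom).toNat [(x, y)]

-- ===== PRECONDITION & SPEC =====
-- Pre_ excludes exactly the inputs on which A raises its two explicit Exceptions.
def Pre_get_recurrent_tiles (x : Int) (y : Int) (curr_zoom : Int) (target_zoom : Int) : Prop :=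
  curr_zoom ≤ target_zoom ∧ 1 ≤ curr_zoom ∧ curr_zoom < 24 ∧ 1 ≤ target_zoom ∧ target_zoom < 24
instance (x : Int) (y : Int) (curr_zoom : Int) (target_zoom : Int) : Decidable (Pre_get_recurrent_tiles x y curr_zoom target_zoom) := by unfold Pre_get_recurrent_tiles; infer_instance

def pvWitness_get_recurrent_tiles : Int × Int × Int × Int := (3, 5, 2, 4)

def Spec_get_recurrent_tiles (x : Int) (y : Int) (curr_zoom : Int) (target_zoom : Int) (out : List (Int × Int)) : Prop := out = get_recurrent_tiles_alt x y curr_zoom target_zoom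
instance (x : Int) (y : Int) (curr_zoom : Int) (target_zoom : Int) (out : List (Int × Int)) : Decidable (Spec_get_recurrent_tiles x y curr_zoom target_zoom out) := by unfold Spec_get_recurrent_tiles; infer_instance

-- ===== CLAIM (what is proved, stated in full; the proofs are below) =====
def Claim_equal_get_recurrent_tiles : Prop := ∀ (x : Int) (y : Int) (curr_zoom : Int) (target_zoom : Int), Dom_get_recurrent_tiles x y curr_zoom target_zoom → Pre_get_recurrent_tiles x y curr_zoom target_zoom → Spec_get_recurrent_tiles x y curr_zoom target_zoom (get_recurrent_tiles x y curr_zoom target_zoom)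

-- ===== LEMMAS AND PROOFS =====

-- flatten a pair list back to the flat coordinate list
def unpair (l : List (Int × Int)) : List Int := l.flatMap (fun p => [p.1, p.2])

theorem pairUpA_unpair (l : List (Int × Int)) : pairUpA (unpair l) = l := by
  induction l with
  | nil => rfl
  | cons p rest ih => simp [unpair, List.flatMap_cons] at ih ⊢; simpa [pairUpA] using ih

theorem expandB_append (n : Nat) (a b : List (Int × Int)) :
    expandB n (a ++ b) = expandB n a ++ expandB n b := by
  induction n generalizing a b with
  | zero => rfl
  | succ n ih => simp [expandB, List.flatMap_append, ih]

theorem recA_eq (n : Nat) : ∀ (x y cz tz : Int), tz - cz = (n : Int) →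
    recurrentTilesA n x y cz tz = unpair (expandB n [(x, y)]) := by
  induction n with
  | zero =>
    intro x y cz tz h
    simp [recurrentTilesA, h, expandB, unpair]
  | succ n ih =>
    intro x y cz tz h
    have hne : tz - cz ≠ 0 := by omega
    have h' : tz - (cz + 1) = (n : Int) := by push_cast at h ⊢; omega
    rw [recurrentTilesA]
    simp only [hne, List.foldl_cons, List.foldl_nil, List.nil_append]
    rw [ih _ _ _ _ h', ih _ _ _ _ h', ih _ _ _ _ h', ih _ _ _ _ h']
    have hstep : expandB (n + 1) [(x, y)] =
        expandB n [(2*x, 2*y)] ++ expandB n [(2*x+1, 2*y)] ++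
        expandB n [(2*x, 2*y+1)] ++ expandB n [(2*x+1, 2*y+1)] := by
      show expandB n ([(x,y)].flatMap childrenB) = _
      rw [show ([(x,y)].flatMap childrenB : List (Int × Int)) =
          [(2*x, 2*y)] ++ [(2*x+1, 2*y)] ++ [(2*x, 2*y+1)] ++ [(2*x+1, 2*y+1)] from by
            simp [childrenB, List.flatMap_cons],
          expandB_append, expandB_append, expandB_append]
    rw [hstep]
    simp [unpair, List.flatMap_append, mul_comm]

-- ===== VERDICT (by name: the statement is the Claim_ definition above) =====
theorem get_recurrent_tiles_spec : Claim_equal_get_recurrent_tiles := by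
  intro x y cz tz _ hpre
  obtain ⟨hle, h1, h2, h3, h4⟩ := hpre
  unfold Spec_get_recurrent_tiles get_recurrent_tiles get_recurrent_tiles_alt
  have hng : ¬ cz > tz := by omega
  rw [if_neg hng, if_neg (by omega), if_neg hng, if_neg (by omega)]
  have hn : tz - cz = ((tz - cz).toNat : Int) := by omega
  rw [recA_eq _ _ _ _ _ hn, pairUpA_unpair]
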